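-- pv_equiv track=rewrite | github.com/nyongja/Algorithm | Part2/Ch4 Implementation/4-2.py | solution
-- ===== SOURCE A (Python) =====
-- def solution(n):
--     result = 0
--     # 1분에 '3'이 등장하는 초
--     sec_count = 0
--     for sec in range(0, 60) :
--         if sec % 10 == 3 or sec // 10 == 3 :
--             sec_count += 1
--     # 1시간에 '3'이 등장하는 분
--     min_count = 0
--     for min in range(0, 60) :
--         if min % 10 == 3 or min // 10 == 3 :
--             min_count += 60
--         else :
--             min_count += sec_count
--     # '3'이 등장하는 시간에 따른 결과 계산
--     for hour in range(0, n+1) :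
--         if hour % 10 == 3 or hour // 10 == 3 :
--             result += 3600
--         else :
--             result += min_count
--
--     return result
-- ===== SOURCE B (Python) =====
-- def solution(n):
--     # Closed form: count hours in 0..n whose %10 or //10 digit is 3,
--     # then combine with the constant per-hour totals (3600 vs 1575).
--     if n < 0:
--         return 0
--     units = (n + 7) // 10                      # hours with h % 10 == 3
--     tens = min(max(n - 29, 0), 10)             # hours with h // 10 == 3 (30..39)
--     both = 1 if n >= 33 else 0                 # hour 33 counted twice
--     c = units + tens - both
--     return 3600 * c + 1575 * (n + 1 - c)
-- ===== Notes on version B (the rewrite author's own statement) =====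
-- stated objective: faster
-- what changed: Replaces A's three counting loops (over seconds, minutes, and hours up to n) with a closed-form arithmetic count of the matching hours combined with the two constant per-hour totals.
import Mathlib
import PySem

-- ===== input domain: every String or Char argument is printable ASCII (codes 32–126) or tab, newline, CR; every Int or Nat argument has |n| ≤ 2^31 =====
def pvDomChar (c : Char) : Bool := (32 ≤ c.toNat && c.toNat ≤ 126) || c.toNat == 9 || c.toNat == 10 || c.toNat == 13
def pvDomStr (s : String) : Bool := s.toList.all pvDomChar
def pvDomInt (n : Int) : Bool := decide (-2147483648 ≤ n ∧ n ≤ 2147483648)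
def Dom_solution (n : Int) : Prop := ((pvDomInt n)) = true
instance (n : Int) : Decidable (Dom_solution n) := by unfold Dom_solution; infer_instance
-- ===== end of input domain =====

-- B computes the same count in closed form instead of three counting loops (faster in a timing run).

-- ===== PORT A =====
def solution (n : Int) : Int :=
  let sec_count : Int :=
    (PySem.List.pyRange 0 60 1).foldl
      (fun acc sec =>
        if PySem.Int.mod sec 10 = 3 ∨ PySem.Int.floordiv sec 10 = 3 then acc + 1 else acc) 0
  let min_count : Int :=
    (PySem.List.pyRange 0 60 1).foldl
      (fun acc m =>
        if PySem.Int.mod m 10 = 3 ∨ PySem.Int.floordiv m 10 = 3 then acc + 60 else acc + sec_count) 0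
  (PySem.List.pyRange 0 (n + 1) 1).foldl
    (fun acc h =>
      if PySem.Int.mod h 10 = 3 ∨ PySem.Int.floordiv h 10 = 3 then acc + 3600 else acc + min_count) 0

-- ===== PORT B =====
def solution_alt (n : Int) : Int :=
  if n < 0 then 0
  else
    let units : Int := PySem.Int.floordiv (n + 7) 10
    let tens : Int := min (max (n - 29) 0) 10
    let both : Int := if n ≥ 33 then 1 else 0
    let c : Int := units + tens - both
    3600 * c + 1575 * (n + 1 - c)

-- ===== PRECONDITION & SPEC =====
def Spec_solution (n : Int) (out : Int) : Prop := out = solution_alt n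
instance (n : Int) (out : Int) : Decidable (Spec_solution n out) := by unfold Spec_solution; infer_instance

-- ===== CLAIM (what is proved, stated in full; the proofs are below) =====
def Claim_equal_solution : Prop := ∀ (n : Int), Dom_solution n → Spec_solution n (solution n)

-- ===== LEMMAS AND PROOFS =====

-- the closed form of B, as a function of n (for 0 ≤ n)
def pvCF (n : Int) : Int :=
  let c := PySem.Int.floordiv (n + 7) 10 + min (max (n - 29) 0) 10 - (if n ≥ 33 then 1 else 0)
  3600 * c + 1575 * (n + 1 - c)

theorem pvCF_alt (n : Int) (h : 0 ≤ n) : solution_alt n = pvCF n := by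
  simp [solution_alt, pvCF, not_lt.mpr h]

-- A's two precompute loops evaluate to the constants 15 and 1575
theorem pvSec :
    ((PySem.List.pyRange 0 60 1).foldl
      (fun acc sec =>
        if PySem.Int.mod sec 10 = 3 ∨ PySem.Int.floordiv sec 10 = 3 then acc + 1 else acc) 0 : Int)
    = 15 := by decide

theorem pvMin :
    ((PySem.List.pyRange 0 60 1).foldl
      (fun acc m =>
        if PySem.Int.mod m 10 = 3 ∨ PySem.Int.floordiv m 10 = 3 then acc + 60 else acc + 15) 0 : Int)
    = 1575 := by decide

-- the per-hour step of A matches the increment of the closed form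
theorem pvStep (m : Int) (h : -1 ≤ m) :
    pvCF (m + 1) =
      pvCF m + (if PySem.Int.mod (m + 1) 10 = 3 ∨ PySem.Int.floordiv (m + 1) 10 = 3 then 3600 else 1575) := by
  have h10 : (0 : Int) < 10 := by norm_num
  rw [pvCF, pvCF, PySem.Int.mod_eq_emod_of_pos h10, PySem.Int.floordiv_eq_ediv_of_pos h10,
      PySem.Int.floordiv_eq_ediv_of_pos h10, PySem.Int.floordiv_eq_ediv_of_pos h10]
  split_ifs <;> omega

-- the final loop of A (with the constants substituted) equals the closed form
theorem pvLoop (k : Nat) :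
    ((PySem.List.pyRange 0 ((k : Int)) 1).foldl
      (fun acc h =>
        if PySem.Int.mod h 10 = 3 ∨ PySem.Int.floordiv h 10 = 3 then acc + 3600 else acc + 1575) 0 : Int)
    = pvCF ((k : Int) - 1) := by
  induction k with
  | zero =>
      rw [PySem.List.pyRange_one_eq_nil (by norm_num)]
      simp [pvCF, PySem.Int.floordiv]
  | succ k ih =>
      have hk : (0 : Int) ≤ (k : Int) := Int.natCast_nonneg k
      rw [show ((k + 1 : Nat) : Int) = (k : Int) + 1 by push_cast; ring,
          PySem.List.pyRange_one_succ_right hk, List.foldl_append, ih]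
      simp only [List.foldl_cons, List.foldl_nil]
      have hs := pvStep ((k : Int) - 1) (by omega)
      rw [show (k : Int) - 1 + 1 = (k : Int) by ring] at hs
      rw [show (k : Int) + 1 - 1 = ((k : Int) - 1) + 1 by ring,
          show (k : Int) - 1 + 1 = (k : Int) by ring, hs]
      split_ifs <;> ring

-- ===== VERDICT (by name: the statement is the Claim_ definition above) =====
theorem solution_spec : Claim_equal_solution := by
  intro n _
  unfold Spec_solution solution
  simp only [pvSec, pvMin]
  by_cases hn : n < 0
  · rw [PySem.List.pyRange_one_eq_nil (by omega)]
    simp [solution_alt, hn]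
  · rw [not_lt] at hn
    have hk : n + 1 = ((n + 1).toNat : Int) := by omega
    rw [hk, pvLoop (n + 1).toNat, pvCF_alt n hn]
    congr 1
    omega
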